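-- pv_equiv track=rewrite | github.com/devpedropavanello/PrototipoTriagemManchester | app.py | aplicar_regras_sintoma
-- ===== SOURCE A (Python) =====
-- sintomas_info = {
--     "dor_no_peito": {
--         "titulo": "Dor no peito",
--         "perguntas": [
--             {"id": "p1", "texto": "A dor começou de repente?"},
--             {"id": "p2", "texto": "Está com suor, enjoo ou falta de ar?"},
--             {"id": "p3", "texto": "A dor irradia para braço, mandíbula ou costas?"}
--         ],
--         "criticos": ["p2", "p3"],
--         "urgente": ["p1"]
--     },
--     "falta_de_ar": {
--         "titulo": "Falta de ar",
--         "perguntas": [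
--             {"id": "p1", "texto": "A dificuldade é ao falar ou respirar mesmo em repouso?"},
--             {"id": "p2", "texto": "Tem histórico de asma/ DPOC e piora significativa?"},
--             {"id": "p3", "texto": "A cor dos lábios ou pele está azulada?"}
--         ],
--         "criticos": ["p1", "p3"],
--         "urgente": ["p2"]
--     },
--     "febre": {
--         "titulo": "Febre",
--         "perguntas": [
--             {"id": "p1", "texto": "A febre está muito alta (>39°C)?"},
--             {"id": "p2", "texto": "Há manchas na pele ou rigidez de nuca?"},
--             {"id": "p3", "texto": "Tem dificuldade para respirar ou confusão?"}
--         ],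
--         "criticos": ["p2", "p3"],
--         "urgente": ["p1"]
--     },
--     "queda_acidente": {
--         "titulo": "Queda ou acidente",
--         "perguntas": [
--             {"id": "p1", "texto": "Há sangramento intenso?"},
--             {"id": "p2", "texto": "Perda de consciência ou confusão?"},
--             {"id": "p3", "texto": "Fratura aparente ou dor intensa?"}
--         ],
--         "criticos": ["p1", "p2"],
--         "urgente": ["p3"]
--     },
--     "dor_abdominal": {
--         "titulo": "Dor abdominal",
--         "perguntas": [
--             {"id": "p1", "texto": "A dor está muito intensa e súbita?"},
--             {"id": "p2", "texto": "Tem vômito persistente ou sangramento?"}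
--         ],
--         "criticos": ["p1", "p2"],
--         "urgente": []
--     },
--     "outros": {
--         "titulo": "Outros sintomas",
--         "perguntas": [
--             {"id": "p1", "texto": "É um sintoma novo e muito intenso?"},
--             {"id": "p2", "texto": "Há sangramento ou sinal de gravidade?"}
--         ],
--         "criticos": ["p2"],
--         "urgente": ["p1"]
--     },
--     "sintoma_leve": {
--         "titulo": "Sintoma leve",
--         "perguntas": [
--             {"id": "p1", "texto": "Está presente, mas não é grave?"},
--             {"id": "p2", "texto": "É incômodo, mas não prejudica atividades?"}
--         ],
--         "criticos": [],
--         "urgente": []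
--     }
-- }
--
-- def aplicar_regras_sintoma(sintoma_key, respostas):
--     info = sintomas_info.get(sintoma_key)
--     if not info:
--         return "verde", "Sintoma não encontrado - avaliação padrão."
--
--     criticos = info.get("criticos", [])
--     urgentes = info.get("urgente", [])
--
--     if not isinstance(respostas, list) or not respostas:
--         return "verde", "Sem respostas válidas."
--
--     if any(r["resposta"] == "sim" and r["id"] in criticos for r in respostas):
--         return "vermelho", f"{info['titulo']}: Condição crítica - atendimento imediato."
--
--     if any(r["resposta"] == "sim" and r["id"] in urgentes for r in respostas):
--         return "laranja", f"{info['titulo']}: Situação muito urgente - avaliação rápida necessária."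
--
--     if any(r["resposta"] == "sim" for r in respostas):
--         return "amarelo", f"{info['titulo']}: Condição moderada - aguardar atendimento."
--
--     return "verde", f"{info['titulo']}: Sem sinais de gravidade."
-- ===== SOURCE B (Python) =====
-- sintomas_info = {
--     "dor_no_peito": {"titulo": "Dor no peito", "criticos": ["p2", "p3"], "urgente": ["p1"]},
--     "falta_de_ar": {"titulo": "Falta de ar", "criticos": ["p1", "p3"], "urgente": ["p2"]},
--     "febre": {"titulo": "Febre", "criticos": ["p2", "p3"], "urgente": ["p1"]},
--     "queda_acidente": {"titulo": "Queda ou acidente", "criticos": ["p1", "p2"], "urgente": ["p3"]},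
--     "dor_abdominal": {"titulo": "Dor abdominal", "criticos": ["p1", "p2"], "urgente": []},
--     "outros": {"titulo": "Outros sintomas", "criticos": ["p2"], "urgente": ["p1"]},
--     "sintoma_leve": {"titulo": "Sintoma leve", "criticos": [], "urgente": []},
-- }
--
-- def aplicar_regras_sintoma(sintoma_key, respostas):
--     info = sintomas_info.get(sintoma_key)
--     if not info:
--         return "verde", "Sintoma não encontrado - avaliação padrão."
--     if not isinstance(respostas, list) or not respostas:
--         return "verde", "Sem respostas válidas."
--     criticos = info["criticos"]
--     urgentes = info["urgente"]
--     titulo = info["titulo"]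
--     has_urg = False
--     has_sim = False
--     for r in respostas:
--         if r["resposta"] == "sim":
--             if r["id"] in criticos:
--                 return "vermelho", f"{titulo}: Condição crítica - atendimento imediato."
--             if r["id"] in urgentes:
--                 has_urg = True
--             has_sim = True
--     if has_urg:
--         return "laranja", f"{titulo}: Situação muito urgente - avaliação rápida necessária."
--     if has_sim:
--         return "amarelo", f"{titulo}: Condição moderada - aguardar atendimento."
--     return "verde", f"{titulo}: Sem sinais de gravidade."
-- ===== Notes on version B (the rewrite author's own statement) =====
-- stated objective: alternative
-- what changed: Replaced A's three separate any()-scans over respostas by one single pass that returns vermelho at the first critical 'sim' and otherwise accumulates has_urgente/has_sim flags, deciding the colour after the loop.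
import Mathlib
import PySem

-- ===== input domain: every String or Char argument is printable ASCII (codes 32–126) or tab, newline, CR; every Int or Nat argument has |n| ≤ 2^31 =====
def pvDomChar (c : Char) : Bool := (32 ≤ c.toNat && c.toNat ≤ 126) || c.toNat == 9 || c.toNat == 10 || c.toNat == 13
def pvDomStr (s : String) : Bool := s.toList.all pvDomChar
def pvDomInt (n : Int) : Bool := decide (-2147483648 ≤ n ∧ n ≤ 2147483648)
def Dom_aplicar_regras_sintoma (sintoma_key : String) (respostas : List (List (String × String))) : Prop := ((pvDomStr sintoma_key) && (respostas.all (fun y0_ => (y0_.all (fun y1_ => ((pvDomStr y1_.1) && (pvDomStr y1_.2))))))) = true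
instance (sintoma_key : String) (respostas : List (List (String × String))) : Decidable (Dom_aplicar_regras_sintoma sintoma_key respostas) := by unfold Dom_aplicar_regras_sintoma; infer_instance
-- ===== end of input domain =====

-- B replaces A's three short-circuiting any()-scans over respostas by a single pass that
-- returns vermelho at the first critical 'sim' and otherwise accumulates two boolean flags
-- (objective: alternative decomposition, same cost class).

-- shared module-level constant table: sintomas_info.get(k) projected to (titulo, criticos, urgente)
def pvInfo (k : String) : Option (String × List String × List String) :=
  if k = "dor_no_peito" then some ("Dor no peito", ["p2", "p3"], ["p1"])
  else if k = "falta_de_ar" then some ("Falta de ar", ["p1", "p3"], ["p2"])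
  else if k = "febre" then some ("Febre", ["p2", "p3"], ["p1"])
  else if k = "queda_acidente" then some ("Queda ou acidente", ["p1", "p2"], ["p3"])
  else if k = "dor_abdominal" then some ("Dor abdominal", ["p1", "p2"], [])
  else if k = "outros" then some ("Outros sintomas", ["p2"], ["p1"])
  else if k = "sintoma_leve" then some ("Sintoma leve", [], [])
  else none

-- r[k] for a dict element; Pre_ guarantees the key is present wherever Python reads it
def pvGetD (r : List (String × String)) (k : String) : String := (r.lookup k).getD ""

-- ===== PORT A =====
def aplicar_regras_sintoma (sintoma_key : String) (respostas : List (List (String × String))) : String × String :=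
  match pvInfo sintoma_key with
  | none => ("verde", "Sintoma não encontrado - avaliação padrão.")
  | some (titulo, criticos, urgentes) =>
    if respostas = [] then ("verde", "Sem respostas válidas.")
    else if respostas.any (fun r => pvGetD r "resposta" == "sim" && criticos.contains (pvGetD r "id")) then
      ("vermelho", titulo ++ ": Condição crítica - atendimento imediato.")
    else if respostas.any (fun r => pvGetD r "resposta" == "sim" && urgentes.contains (pvGetD r "id")) then
      ("laranja", titulo ++ ": Situação muito urgente - avaliação rápida necessária.")
    else if respostas.any (fun r => pvGetD r "resposta" == "sim") then
      ("amarelo", titulo ++ ": Condição moderada - aguardar atendimento.")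
    else ("verde", titulo ++ ": Sem sinais de gravidade.")

-- ===== PORT B =====
-- the single for-loop of Source B: state = (has_urg, has_sim); early return on a critical 'sim'
def pvScanB (titulo : String) (criticos urgentes : List String) :
    List (List (String × String)) → Bool → Bool → String × String
  | [], hU, hS =>
    if hU then ("laranja", titulo ++ ": Situação muito urgente - avaliação rápida necessária.")
    else if hS then ("amarelo", titulo ++ ": Condição moderada - aguardar atendimento.")
    else ("verde", titulo ++ ": Sem sinais de gravidade.")
  | r :: rest, hU, hS =>
    if pvGetD r "resposta" == "sim" then
      if criticos.contains (pvGetD r "id") then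
        ("vermelho", titulo ++ ": Condição crítica - atendimento imediato.")
      else pvScanB titulo criticos urgentes rest (hU || urgentes.contains (pvGetD r "id")) true
    else pvScanB titulo criticos urgentes rest hU hS

def aplicar_regras_sintoma_alt (sintoma_key : String) (respostas : List (List (String × String))) : String × String :=
  match pvInfo sintoma_key with
  | none => ("verde", "Sintoma não encontrado - avaliação padrão.")
  | some (titulo, criticos, urgentes) =>
    if respostas = [] then ("verde", "Sem respostas válidas.")
    else pvScanB titulo criticos urgentes respostas false false

-- ===== PRECONDITION & SPEC =====
-- Pre_ excludes inputs on which Python A raises KeyError: when the sintoma key is known and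
-- respostas is nonempty, every element must carry 'resposta' and, if it answers 'sim', also 'id'.
-- This is slightly narrower than A's exact raising set: it also excludes lists whose malformed
-- element sits after an earlier critical 'sim' (there A and B both return vermelho; see cites).
def Pre_aplicar_regras_sintoma (sintoma_key : String) (respostas : List (List (String × String))) : Prop :=
  sintoma_key ∉ ["dor_no_peito", "falta_de_ar", "febre", "queda_acidente", "dor_abdominal", "outros", "sintoma_leve"] ∨
  respostas = [] ∨
  ∀ r ∈ respostas, (r.lookup "resposta").isSome ∧
    ((r.lookup "resposta").getD "" = "sim" → (r.lookup "id").isSome)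
instance (sintoma_key : String) (respostas : List (List (String × String))) : Decidable (Pre_aplicar_regras_sintoma sintoma_key respostas) := by unfold Pre_aplicar_regras_sintoma; infer_instance

def pvWitness_aplicar_regras_sintoma : String × (List (List (String × String))) :=
  ("febre", [[("resposta", "sim"), ("id", "p1")]])

def Spec_aplicar_regras_sintoma (sintoma_key : String) (respostas : List (List (String × String))) (out : String × String) : Prop := out = aplicar_regras_sintoma_alt sintoma_key respostas
instance (sintoma_key : String) (respostas : List (List (String × String))) (out : String × String) : Decidable (Spec_aplicar_regras_sintoma sintoma_key respostas out) := by unfold Spec_aplicar_regras_sintoma; infer_instance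

-- ===== CLAIM (what is proved, stated in full; the proofs are below) =====
def Claim_equal_aplicar_regras_sintoma : Prop := ∀ (sintoma_key : String) (respostas : List (List (String × String))), Dom_aplicar_regras_sintoma sintoma_key respostas → Pre_aplicar_regras_sintoma sintoma_key respostas → Spec_aplicar_regras_sintoma sintoma_key respostas (aplicar_regras_sintoma sintoma_key respostas)

-- ===== LEMMAS AND PROOFS =====

-- characterisation of the single pass in terms of A's three scans
theorem pvScanB_eq (t : String) (c u : List String) (l : List (List (String × String)))
    (hU hS : Bool) :
    pvScanB t c u l hU hS =
      (if l.any (fun r => pvGetD r "resposta" == "sim" && c.contains (pvGetD r "id")) then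
        ("vermelho", t ++ ": Condição crítica - atendimento imediato.")
      else if hU || l.any (fun r => pvGetD r "resposta" == "sim" && u.contains (pvGetD r "id")) then
        ("laranja", t ++ ": Situação muito urgente - avaliação rápida necessária.")
      else if hS || l.any (fun r => pvGetD r "resposta" == "sim") then
        ("amarelo", t ++ ": Condição moderada - aguardar atendimento.")
      else ("verde", t ++ ": Sem sinais de gravidade.")) := by
  induction l generalizing hU hS with
  | nil => simp [pvScanB]
  | cons r rest ih =>
    by_cases hs : (pvGetD r "resposta" == "sim") = true
    · by_cases hc : pvGetD r "id" ∈ c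
      · simp [pvScanB, hs, hc]
      · simp [pvScanB, hs, hc, ih, Bool.or_assoc]
    · simp [pvScanB, hs, ih]

-- ===== VERDICT (by name: the statement is the Claim_ definition above) =====
theorem aplicar_regras_sintoma_spec : Claim_equal_aplicar_regras_sintoma := by
  intro k rs _ _
  unfold Spec_aplicar_regras_sintoma aplicar_regras_sintoma aplicar_regras_sintoma_alt
  cases h : pvInfo k with
  | none => rfl
  | some info =>
    obtain ⟨t, c, u⟩ := info
    by_cases he : rs = []
    · simp [he]
    · simp [he, pvScanB_eq]
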